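-- pv_equiv track=rewrite | github.com/sonusario/ARCHIVE | The-Archive/_balancedTernaryAdder.py | triAddS
-- ===== SOURCE A (Python) =====
-- def triAddS(a,b,c):
-- 	sym = {'-':-1,'0':0,'+':1}
-- 	mys = {-1:'-',0:'0',1:'+'}
-- 	if sym[a] == sym[b]:
-- 		out = mys[-sym[b]]
-- 		carry = mys[sym[a]]
-- 	else:
-- 		out = mys[sym[a] + sym[b]]
-- 		carry = '0'
-- 	if c != '0':
-- 		i,out = triAddS(out,c,'0')
-- 		j,carry = triAddS(carry,i,'0')
-- 	return carry,out
-- ===== SOURCE B (Python) =====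
-- def triAddS(a, b, c):
--     sym = {'-': -1, '0': 0, '+': 1}
--     mys = {-1: '-', 0: '0', 1: '+'}
--     s = sym[a] + sym[b] + sym[c]
--     out = (s + 1) % 3 - 1
--     return mys[(s - out) // 3], mys[out]
-- ===== Notes on version B (the rewrite author's own statement) =====
-- stated objective: simpler
-- what changed: Replaces the pairwise branch table plus two recursive calls by a closed form: sum the three trits to s in -3..3, take the balanced digit ((s+1)%3)-1 and carry (s-out)//3, and map both back to symbols.
import Mathlib
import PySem

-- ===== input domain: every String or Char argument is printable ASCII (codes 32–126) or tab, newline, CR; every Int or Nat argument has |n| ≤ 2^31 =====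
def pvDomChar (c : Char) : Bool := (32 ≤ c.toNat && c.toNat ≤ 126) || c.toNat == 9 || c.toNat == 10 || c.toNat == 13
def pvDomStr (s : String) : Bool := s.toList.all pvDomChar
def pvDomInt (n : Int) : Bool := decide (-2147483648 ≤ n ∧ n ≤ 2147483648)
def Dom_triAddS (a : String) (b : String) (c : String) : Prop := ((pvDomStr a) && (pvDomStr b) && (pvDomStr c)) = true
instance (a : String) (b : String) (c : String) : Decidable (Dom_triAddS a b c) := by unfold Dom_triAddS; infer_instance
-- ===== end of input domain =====

-- B replaces A's pairwise branch table plus two recursive calls by one closed-form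
-- digit/carry computation on the summed trits (objective: simpler).

-- ===== PORT A =====
-- sym/mys lookups: Python raises KeyError on symbols outside {'-','0','+'};
-- Pre_triAddS excludes those inputs, so the .getD default is never claimed about.
def pvSymA (s : String) : Int :=
  ((PySem.Dict.ofList [("-", (-1 : Int)), ("0", 0), ("+", 1)]).get? s).getD 0

def pvMysA (n : Int) : String :=
  ((PySem.Dict.ofList [((-1 : Int), "-"), (0, "0"), (1, "+")]).get? n).getD ""

def triAddS (a : String) (b : String) (c : String) : String × String :=
  let p : String × String :=
    if pvSymA a = pvSymA b then
      (pvMysA (pvSymA a), pvMysA (-(pvSymA b)))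
    else
      ("0", pvMysA (pvSymA a + pvSymA b))
  if c ≠ "0" then
    let q := triAddS p.2 c "0"
    let r := triAddS p.1 q.1 "0"
    (r.2, q.2)
  else
    p
termination_by (if c = "0" then 0 else 1)
decreasing_by all_goals simp_all

-- ===== PORT B =====
def triAddS_alt (a : String) (b : String) (c : String) : String × String :=
  let sym : PySem.Dict String Int := PySem.Dict.ofList [("-", -1), ("0", 0), ("+", 1)]
  let mys : PySem.Dict Int String := PySem.Dict.ofList [(-1, "-"), (0, "0"), (1, "+")]
  let s : Int := (sym.get? a).getD 0 + (sym.get? b).getD 0 + (sym.get? c).getD 0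
  let out : Int := PySem.Int.mod (s + 1) 3 - 1
  (((mys.get? (PySem.Int.floordiv (s - out) 3)).getD ""), ((mys.get? out).getD ""))

-- ===== PRECONDITION & SPEC =====
-- Pre_ excludes exactly the inputs on which Python A raises KeyError (a trit not in {'-','0','+'}).
def Pre_triAddS (a : String) (b : String) (c : String) : Prop :=
  (a = "-" ∨ a = "0" ∨ a = "+") ∧ (b = "-" ∨ b = "0" ∨ b = "+") ∧ (c = "-" ∨ c = "0" ∨ c = "+")
instance (a : String) (b : String) (c : String) : Decidable (Pre_triAddS a b c) := by
  unfold Pre_triAddS; infer_instance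

def pvWitness_triAddS : String × String × String := ("+", "-", "+")

def Spec_triAddS (a : String) (b : String) (c : String) (out : String × String) : Prop := out = triAddS_alt a b c
instance (a : String) (b : String) (c : String) (out : String × String) : Decidable (Spec_triAddS a b c out) := by unfold Spec_triAddS; infer_instance

-- ===== CLAIM (what is proved, stated in full; the proofs are below) =====
def Claim_equal_triAddS : Prop := ∀ (a : String) (b : String) (c : String), Dom_triAddS a b c → Pre_triAddS a b c → Spec_triAddS a b c (triAddS a b c)

-- ===== LEMMAS AND PROOFS =====

-- ===== VERDICT (by name: the statement is the Claim_ definition above) =====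
theorem triAddS_spec : Claim_equal_triAddS := by
  intro a b c _ hpre
  obtain ⟨ha, hb, hc⟩ := hpre
  rcases ha with rfl | rfl | rfl <;> rcases hb with rfl | rfl | rfl <;>
    rcases hc with rfl | rfl | rfl <;>
    simp [Spec_triAddS, triAddS, triAddS_alt, pvSymA, pvMysA,
      PySem.Int.mod, PySem.Int.floordiv] <;> decide
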